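-- pv_equiv track=rewrite | github.com/k6208ken/callenge | ch6.py | three_days
-- ===== SOURCE A (Python) =====
-- def three_days(data):
--     output = []
--     for i in range(len(data)):
--         if i < 3:
--             output.append(0)
--         elif data[i] > data[i-1] > data[i-2] > data[i-3]:
--             output.append(1)
--         elif data[i] < data[i-1] < data[i-2] < data[i-3]:
--             output.append(-1)
--         else:
--             output.append(0)
--     return output
-- ===== SOURCE B (Python) =====
-- def three_days(data):
--     if not data:
--         return []
--     output = [0]
--     up = down = 0
--     prev = data[0]
--     for x in data[1:]:
--         if x > prev:
--             up += 1
--             down = 0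
--         elif x < prev:
--             down += 1
--             up = 0
--         else:
--             up = down = 0
--         output.append(1 if up >= 3 else -1 if down >= 3 else 0)
--         prev = x
--     return output
-- ===== Notes on version B (the rewrite author's own statement) =====
-- stated objective: alternative
-- what changed: Replaces A's 4-element window test at every index by a single pass that maintains two streak counters (consecutive strict rises/falls) and compares each element only with its predecessor, flagging 1/-1 when a streak reaches 3.
import Mathlib
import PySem

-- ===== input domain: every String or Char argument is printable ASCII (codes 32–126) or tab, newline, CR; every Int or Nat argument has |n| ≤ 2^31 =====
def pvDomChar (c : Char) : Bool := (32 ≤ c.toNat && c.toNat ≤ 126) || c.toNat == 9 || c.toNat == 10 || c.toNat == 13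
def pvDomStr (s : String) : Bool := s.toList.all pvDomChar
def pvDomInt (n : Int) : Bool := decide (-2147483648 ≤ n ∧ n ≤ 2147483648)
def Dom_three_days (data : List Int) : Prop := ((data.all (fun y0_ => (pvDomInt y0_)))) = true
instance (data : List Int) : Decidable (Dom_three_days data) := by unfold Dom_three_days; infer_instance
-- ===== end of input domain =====

-- B replaces A's 4-element window test by a single pass with two streak counters,
-- comparing each element only with its predecessor (alternative decomposition, same cost).

-- ===== PORT A =====
-- index loop over range(len(data)); data[i-k] via pyGetD (indices are always in range on the reached branches)
def three_days (data : List Int) : List Int :=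
  (PySem.List.pyRange 0 data.length 1).foldl
    (fun output i =>
      output ++ [
        if i < 3 then (0 : Int)
        else if PySem.List.pyGetD data i 0 > PySem.List.pyGetD data (i-1) 0
              ∧ PySem.List.pyGetD data (i-1) 0 > PySem.List.pyGetD data (i-2) 0
              ∧ PySem.List.pyGetD data (i-2) 0 > PySem.List.pyGetD data (i-3) 0 then 1
        else if PySem.List.pyGetD data i 0 < PySem.List.pyGetD data (i-1) 0
              ∧ PySem.List.pyGetD data (i-1) 0 < PySem.List.pyGetD data (i-2) 0
              ∧ PySem.List.pyGetD data (i-2) 0 < PySem.List.pyGetD data (i-3) 0 then -1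
        else 0]) []

-- ===== PORT B =====
-- one step of Source B's loop body: state (up, down, prev, output), next element x
def threeDaysStep (s : Int × Int × Int × List Int) (x : Int) : Int × Int × Int × List Int :=
  let up := s.1; let down := s.2.1; let prev := s.2.2.1; let output := s.2.2.2
  let (up, down) :=
    if x > prev then (up + 1, (0 : Int))
    else if x < prev then ((0 : Int), down + 1)
    else ((0 : Int), (0 : Int))
  (up, down, x, output ++ [if up ≥ 3 then (1 : Int) else if down ≥ 3 then -1 else 0])

-- streak-counter scan: early return on [], then fold Source B's loop body over data[1:]
def three_days_alt (data : List Int) : List Int :=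
  match data with
  | [] => []
  | d0 :: rest => (rest.foldl threeDaysStep (0, 0, d0, [0])).2.2.2

-- ===== PRECONDITION & SPEC =====
def Spec_three_days (data : List Int) (out : List Int) : Prop := out = three_days_alt data
instance (data : List Int) (out : List Int) : Decidable (Spec_three_days data out) := by unfold Spec_three_days; infer_instance

-- ===== CLAIM (what is proved, stated in full; the proofs are below) =====
def Claim_equal_three_days : Prop := ∀ (data : List Int), Dom_three_days data → Spec_three_days data (three_days data)

-- ===== LEMMAS AND PROOFS =====

-- counters of B as functions of the index
def upF (data : List Int) : Nat → Int
  | 0 => 0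
  | i+1 => if data.getD (i+1) 0 > data.getD i 0 then upF data i + 1 else 0

def downF (data : List Int) : Nat → Int
  | 0 => 0
  | i+1 => if data.getD (i+1) 0 < data.getD i 0 then downF data i + 1 else 0

def flagF (data : List Int) (i : Nat) : Int :=
  if upF data i ≥ 3 then 1 else if downF data i ≥ 3 then -1 else 0

theorem upF_le (data : List Int) : ∀ i, upF data i ≤ (i : Int) := by
  intro i; induction i with
  | zero => simp [upF]
  | succ n ih => unfold upF; split_ifs <;> push_cast <;> omega

theorem downF_le (data : List Int) : ∀ i, downF data i ≤ (i : Int) := by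
  intro i; induction i with
  | zero => simp [downF]
  | succ n ih => unfold downF; split_ifs <;> push_cast <;> omega

theorem upF_nonneg (data : List Int) : ∀ i, 0 ≤ upF data i := by
  intro i; induction i with
  | zero => simp [upF]
  | succ n ih => unfold upF; split_ifs <;> omega

theorem downF_nonneg (data : List Int) : ∀ i, 0 ≤ downF data i := by
  intro i; induction i with
  | zero => simp [downF]
  | succ n ih => unfold downF; split_ifs <;> omega

theorem upF_ge3 (data : List Int) (k : Nat) :
    (3 ≤ upF data (k+3)) ↔
      (data.getD (k+3) 0 > data.getD (k+2) 0 ∧ data.getD (k+2) 0 > data.getD (k+1) 0 ∧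
       data.getD (k+1) 0 > data.getD k 0) := by
  have h0 := upF_nonneg data k
  show (3 ≤ upF data (k+2+1)) ↔ _
  unfold upF; unfold upF; unfold upF
  split_ifs <;> simp_all <;> omega

theorem downF_ge3 (data : List Int) (k : Nat) :
    (3 ≤ downF data (k+3)) ↔
      (data.getD (k+3) 0 < data.getD (k+2) 0 ∧ data.getD (k+2) 0 < data.getD (k+1) 0 ∧
       data.getD (k+1) 0 < data.getD k 0) := by
  have h0 := downF_nonneg data k
  show (3 ≤ downF data (k+2+1)) ↔ _
  unfold downF; unfold downF; unfold downF
  split_ifs <;> simp_all <;> omega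

-- the loop of B, characterised: from the state after index i, folding over data.drop (i+1)
-- appends flagF for indices i+1 … length-1
theorem loopB (data : List Int) : ∀ (n i : Nat) (acc : List Int),
    data.length = i + 1 + n →
    ((data.drop (i+1)).foldl threeDaysStep (upF data i, downF data i, data.getD i 0, acc)).2.2.2
      = acc ++ (List.range' (i+1) n).map (flagF data) := by
  intro n
  induction n with
  | zero =>
    intro i acc h
    rw [List.drop_eq_nil_of_le (by omega)]
    simp
  | succ m ih =>
    intro i acc h
    have hlt : i + 1 < data.length := by omega
    have hdrop : data.drop (i+1) = data.getD (i+1) 0 :: data.drop (i+2) := by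
      rw [List.getD_eq_getElem data 0 hlt]
      rw [← List.getElem_cons_drop hlt]
    rw [hdrop, List.foldl_cons]
    have hstep : threeDaysStep (upF data i, downF data i, data.getD i 0, acc) (data.getD (i+1) 0)
        = (upF data (i+1), downF data (i+1), data.getD (i+1) 0, acc ++ [flagF data (i+1)]) := by
      have hu : upF data (i+1) = if data.getD (i+1) 0 > data.getD i 0 then upF data i + 1 else 0 := rfl
      have hdn : downF data (i+1) = if data.getD (i+1) 0 < data.getD i 0 then downF data i + 1 else 0 := rfl
      simp only [threeDaysStep, flagF, hu, hdn]
      split_ifs <;> simp_all <;> omega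
    rw [hstep]
    rw [ih (i+1) (acc ++ [flagF data (i+1)]) (by omega)]
    rw [List.range'_succ]
    simp

theorem threeDaysAlt_eq_map (data : List Int) :
    three_days_alt data = (List.range data.length).map (flagF data) := by
  match data with
  | [] => rfl
  | d0 :: rest =>
    show (List.foldl threeDaysStep (0, 0, d0, [0]) rest).2.2.2 = _
    have h0 : upF (d0 :: rest) 0 = 0 := rfl
    have h1 : downF (d0 :: rest) 0 = 0 := rfl
    have h2 : (d0 :: rest).getD 0 0 = d0 := rfl
    have h3 : (d0 :: rest).drop 1 = rest := rfl
    have hmain := loopB (d0 :: rest) rest.length 0 [0] (by simp [Nat.add_comm])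
    rw [h0, h1, h2, h3] at hmain
    rw [hmain]
    have hflag0 : flagF (d0 :: rest) 0 = 0 := by unfold flagF upF downF; norm_num
    rw [List.range_eq_range']
    have hr : List.range' 0 (d0 :: rest).length = 0 :: List.range' 1 rest.length := by
      simp only [List.length_cons, List.range'_succ]
    rw [hr]
    simp [hflag0]

-- A as a map over indices (by the PySem append-fold bridge)
theorem three_days_eq_map (data : List Int) :
    three_days data = (List.range data.length).map (fun k : Nat =>
      if (k : Int) < 3 then (0 : Int)
      else if PySem.List.pyGetD data (k : Int) 0 > PySem.List.pyGetD data ((k : Int)-1) 0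
            ∧ PySem.List.pyGetD data ((k : Int)-1) 0 > PySem.List.pyGetD data ((k : Int)-2) 0
            ∧ PySem.List.pyGetD data ((k : Int)-2) 0 > PySem.List.pyGetD data ((k : Int)-3) 0 then 1
      else if PySem.List.pyGetD data (k : Int) 0 < PySem.List.pyGetD data ((k : Int)-1) 0
            ∧ PySem.List.pyGetD data ((k : Int)-1) 0 < PySem.List.pyGetD data ((k : Int)-2) 0
            ∧ PySem.List.pyGetD data ((k : Int)-2) 0 < PySem.List.pyGetD data ((k : Int)-3) 0 then -1
      else 0) := by
  unfold three_days
  rw [PySem.List.foldl_append_singleton_eq_map, PySem.List.pyRange_zero_nat, List.map_map]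
  rfl

-- ===== VERDICT (by name: the statement is the Claim_ definition above) =====
theorem three_days_spec : Claim_equal_three_days := by
  intro data _
  show three_days data = three_days_alt data
  rw [three_days_eq_map, threeDaysAlt_eq_map]
  apply List.map_congr_left
  intro j hj
  rw [List.mem_range] at hj
  by_cases h3 : j < 3
  · -- streaks shorter than 3 on both sides
    have hu := upF_le data j
    have hd := downF_le data j
    rw [if_pos (by exact_mod_cast h3)]
    unfold flagF
    rw [if_neg (by omega), if_neg (by omega)]
  · obtain ⟨k, rfl⟩ : ∃ k, j = k + 3 := ⟨j - 3, by omega⟩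
    rw [if_neg (by push_cast; omega)]
    have e0 : PySem.List.pyGetD data ((k+3 : Nat) : Int) 0 = data.getD (k+3) 0 := by
      rw [PySem.List.pyGetD_eq_getElem data (i := ((k+3:Nat) : Int)) 0 (by positivity) (by push_cast; omega)]
      rw [List.getD_eq_getElem data 0 (by omega)]
      congr 1 <;> omega
    have e1 : PySem.List.pyGetD data (((k+3 : Nat) : Int) - 1) 0 = data.getD (k+2) 0 := by
      rw [PySem.List.pyGetD_eq_getElem data (i := ((k+3:Nat) : Int) - 1) 0 (by push_cast; omega) (by push_cast; omega)]
      rw [List.getD_eq_getElem data 0 (by omega)]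
      congr 1 <;> omega
    have e2 : PySem.List.pyGetD data (((k+3 : Nat) : Int) - 2) 0 = data.getD (k+1) 0 := by
      rw [PySem.List.pyGetD_eq_getElem data (i := ((k+3:Nat) : Int) - 2) 0 (by push_cast; omega) (by push_cast; omega)]
      rw [List.getD_eq_getElem data 0 (by omega)]
      congr 1 <;> omega
    have e3 : PySem.List.pyGetD data (((k+3 : Nat) : Int) - 3) 0 = data.getD k 0 := by
      rw [PySem.List.pyGetD_eq_getElem data (i := ((k+3:Nat) : Int) - 3) 0 (by push_cast; omega) (by push_cast; omega)]
      rw [List.getD_eq_getElem data 0 (by omega)]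
      congr 1 <;> omega
    rw [e0, e1, e2, e3]
    unfold flagF
    simp only [ge_iff_le]
    by_cases hup : data.getD (k+3) 0 > data.getD (k+2) 0 ∧ data.getD (k+2) 0 > data.getD (k+1) 0 ∧ data.getD (k+1) 0 > data.getD k 0
    · rw [if_pos hup, if_pos ((upF_ge3 data k).2 hup)]
    · rw [if_neg hup, if_neg (fun h => hup ((upF_ge3 data k).1 h))]
      by_cases hdn : data.getD (k+3) 0 < data.getD (k+2) 0 ∧ data.getD (k+2) 0 < data.getD (k+1) 0 ∧ data.getD (k+1) 0 < data.getD k 0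
      · rw [if_pos hdn, if_pos ((downF_ge3 data k).2 hdn)]
      · rw [if_neg hdn, if_neg (fun h => hdn ((downF_ge3 data k).1 h))]
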